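-- pv_equiv track=rewrite | github.com/Feli05/SpotifyTracker | ml-service/model/utils.py | extract_questionnaire_preferences
-- ===== SOURCE A (Python) =====
-- def extract_questionnaire_preferences(answers):
--     """
--     Extract mood, vibe, and discovery preferences from questionnaire answers.
--
--     Args:
--         answers (list): List of questionnaire answer objects
--
--     Returns:
--         tuple: (mood, vibe, discovery) preferences
--     """
--     # Extract mood, vibe, and discovery preferences from answers
--     # Each answer has a questionId and a selectedOptionId
--     mood = "balanced"
--     vibe = "balanced"
--     discovery = "balanced"
--
--     for answer in answers:
--         question_id = answer.get('questionId')
--         selected_option = answer.get('selectedOption')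
--
--         if question_id == 'mood':
--             mood = selected_option
--         elif question_id == 'vibe':
--             vibe = selected_option
--         elif question_id == 'discovery':
--             discovery = selected_option
--
--     return mood, vibe, discovery
-- ===== SOURCE B (Python) =====
-- def extract_questionnaire_preferences(answers):
--     """Answer each of the three queries independently by scanning the answer
--     list BACKWARDS for the first (i.e. overall last) answer with that
--     questionId -- last-wins without ever building an accumulator."""
--     def last_answer(qid):
--         for a in reversed(answers):
--             if a.get('questionId') == qid:
--                 return a.get('selectedOption')
--         return "balanced"
--     return last_answer('mood'), last_answer('vibe'), last_answer('discovery')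
-- ===== Notes on version B (the rewrite author's own statement) =====
-- stated objective: alternative
-- what changed: Replaces A's single forward pass that accumulates three variables through an if/elif chain with three independent backward searches (reversed list, first match per key) that each stop early at the last matching answer and carry no state at all.
import Mathlib
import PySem

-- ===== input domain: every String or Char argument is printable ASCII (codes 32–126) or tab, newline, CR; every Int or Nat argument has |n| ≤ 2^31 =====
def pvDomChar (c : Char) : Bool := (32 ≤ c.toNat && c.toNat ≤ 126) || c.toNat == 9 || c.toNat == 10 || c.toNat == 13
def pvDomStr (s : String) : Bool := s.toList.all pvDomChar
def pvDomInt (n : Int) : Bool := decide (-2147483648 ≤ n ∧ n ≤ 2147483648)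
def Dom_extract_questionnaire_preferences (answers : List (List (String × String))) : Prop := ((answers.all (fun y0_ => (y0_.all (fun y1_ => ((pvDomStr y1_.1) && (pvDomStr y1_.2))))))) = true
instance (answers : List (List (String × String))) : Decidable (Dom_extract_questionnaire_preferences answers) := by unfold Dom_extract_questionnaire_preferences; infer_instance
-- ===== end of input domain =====

-- B replaces A's forward accumulation through an if/elif chain with three independent
-- backward searches (first match in the reversed list per key); same O(n), no state.

-- a.get(k) on the answer dict: first-match lookup on the association list
def pvGet (a : List (String × String)) (k : String) : Option String :=
  (PySem.Dict.mk a).get? k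

-- ===== PORT A =====
-- state carries Option String because A can assign None (selectedOption missing);
-- the final .getD is only reached outside Pre_ (where A's value is not a string).
def pvStepA (s : Option String × Option String × Option String)
    (a : List (String × String)) : Option String × Option String × Option String :=
  let qid := pvGet a "questionId"
  let so := pvGet a "selectedOption"
  if qid = some "mood" then (so, s.2.1, s.2.2)
  else if qid = some "vibe" then (s.1, so, s.2.2)
  else if qid = some "discovery" then (s.1, s.2.1, so)
  else s

def extract_questionnaire_preferences (answers : List (List (String × String))) : String × String × String :=
  let st := answers.foldl pvStepA (some "balanced", some "balanced", some "balanced")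
  (st.1.getD "balanced", st.2.1.getD "balanced", st.2.2.getD "balanced")

-- ===== PORT B =====
-- the inner 'for a in reversed(answers)' loop: first match wins, else "balanced";
-- .getD is only reached outside Pre_ (Python returns None there).
def pvLastAnswer (rev : List (List (String × String))) (qid : String) : String :=
  match rev with
  | [] => "balanced"
  | a :: rest =>
    if pvGet a "questionId" = some qid then (pvGet a "selectedOption").getD "balanced"
    else pvLastAnswer rest qid

def extract_questionnaire_preferences_alt (answers : List (List (String × String))) : String × String × String :=
  (pvLastAnswer answers.reverse "mood",
   pvLastAnswer answers.reverse "vibe",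
   pvLastAnswer answers.reverse "discovery")

-- ===== PRECONDITION & SPEC =====
-- Pre_ excludes inputs where some answer maps 'questionId' to one of the three queried
-- keys but has no 'selectedOption': there both Pythons return None, which is not a string.
def Pre_extract_questionnaire_preferences (answers : List (List (String × String))) : Prop :=
  ∀ a ∈ answers,
    (pvGet a "questionId" = some "mood" ∨ pvGet a "questionId" = some "vibe" ∨
     pvGet a "questionId" = some "discovery") → (pvGet a "selectedOption").isSome = true

instance (answers : List (List (String × String))) : Decidable (Pre_extract_questionnaire_preferences answers) := by
  unfold Pre_extract_questionnaire_preferences; infer_instance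

def pvWitness_extract_questionnaire_preferences : (List (List (String × String))) :=
  [[("questionId", "mood"), ("selectedOption", "happy")], [("questionId", "other")]]

def Spec_extract_questionnaire_preferences (answers : List (List (String × String))) (out : String × String × String) : Prop := out = extract_questionnaire_preferences_alt answers
instance (answers : List (List (String × String))) (out : String × String × String) : Decidable (Spec_extract_questionnaire_preferences answers out) := by unfold Spec_extract_questionnaire_preferences; infer_instance

-- ===== CLAIM (what is proved, stated in full; the proofs are below) =====
def Claim_equal_extract_questionnaire_preferences : Prop := ∀ (answers : List (List (String × String))), Dom_extract_questionnaire_preferences answers → Pre_extract_questionnaire_preferences answers → Spec_extract_questionnaire_preferences answers (extract_questionnaire_preferences answers)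

-- ===== LEMMAS AND PROOFS =====

-- A's fold from the left with last-wins overwrites equals the first match
-- in the reversed list, component by component (reverse induction).
theorem pv_fold_eq (answers : List (List (String × String)))
    (hpre : ∀ a ∈ answers,
      (pvGet a "questionId" = some "mood" ∨ pvGet a "questionId" = some "vibe" ∨
       pvGet a "questionId" = some "discovery") → (pvGet a "selectedOption").isSome = true) :
    answers.foldl pvStepA (some "balanced", some "balanced", some "balanced")
      = (some (pvLastAnswer answers.reverse "mood"),
         some (pvLastAnswer answers.reverse "vibe"),
         some (pvLastAnswer answers.reverse "discovery")) := by
  induction answers using List.reverseRecOn with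
  | nil => simp [pvLastAnswer]
  | append_singleton xs a ih =>
    have hxs : ∀ x ∈ xs,
        (pvGet x "questionId" = some "mood" ∨ pvGet x "questionId" = some "vibe" ∨
         pvGet x "questionId" = some "discovery") → (pvGet x "selectedOption").isSome = true :=
      fun x hx => hpre x (List.mem_append_left _ hx)
    have ha := hpre a (List.mem_append_right _ (List.mem_singleton_self a))
    rw [List.foldl_append, ih hxs]
    simp only [List.reverse_append, List.reverse_singleton, List.singleton_append]
    rcases hq : pvGet a "questionId" with _ | q
    · simp [pvStepA, pvLastAnswer, hq]
    · by_cases hm : q = "mood"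
      · subst hm
        rcases hs : pvGet a "selectedOption" with _ | v
        · exact absurd (ha (Or.inl hq)) (by simp [hs])
        · simp [pvStepA, pvLastAnswer, hq, hs]
      · by_cases hv : q = "vibe"
        · subst hv
          rcases hs : pvGet a "selectedOption" with _ | v
          · exact absurd (ha (Or.inr (Or.inl hq))) (by simp [hs])
          · simp [pvStepA, pvLastAnswer, hq, hs]
        · by_cases hd : q = "discovery"
          · subst hd
            rcases hs : pvGet a "selectedOption" with _ | v
            · exact absurd (ha (Or.inr (Or.inr hq))) (by simp [hs])
            · simp [pvStepA, pvLastAnswer, hq, hs]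
          · have hm' : ¬ (q = "mood") := hm
            simp [pvStepA, pvLastAnswer, hq, hm, hv, hd]

-- ===== VERDICT =====
theorem extract_questionnaire_preferences_spec : Claim_equal_extract_questionnaire_preferences := by
  intro answers _ hpre
  unfold Spec_extract_questionnaire_preferences extract_questionnaire_preferences extract_questionnaire_preferences_alt
  rw [pv_fold_eq answers hpre]
  simp
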